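-- pv_equiv track=rewrite | github.com/juanesgl/AYED-2024-2 | TERCIO-1/LABORATORIO5/containers.py | count_stacks
-- ===== SOURCE A (Python) =====
-- def count_stacks(s):
--     stacks = [[]]
--     stacks[0].append(s[0])
--
--     for i in range(1, len(s)):
--         char = s[i]
--         mn = float('inf')
--         mni = -1
--
--         for j in range(len(stacks)):
--             if stacks[j][-1] >= char:
--                 distance = ord(stacks[j][-1]) - ord(char)
--                 if distance < mn:
--                     mn = distance
--                     mni = j
--
--         if mni == -1:
--             stacks.append([char])
--         else:
--             stacks[mni].append(char)
--
--     return len(stacks)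
-- ===== SOURCE B (Python) =====
-- def count_stacks(s):
--     # Patience-stacking: only the multiset of stack tops matters, and keeping
--     # the tops in one sorted list lets a binary search find the best-fit
--     # (smallest top >= ch) directly; the number of stacks is len(tops).
--     tops = []
--     for ch in s:
--         lo, hi = 0, len(tops)
--         while lo < hi:
--             mid = (lo + hi) // 2
--             if tops[mid] < ch:
--                 lo = mid + 1
--             else:
--                 hi = mid
--         if lo == len(tops):
--             tops.append(ch)
--         else:
--             tops[lo] = ch
--     return len(tops)
-- ===== Notes on version B (the rewrite author's own statement) =====
-- stated objective: faster
-- what changed: B drops the list of stacks entirely and keeps only a sorted list of current stack tops, locating the best-fit top (smallest top >= ch) by binary search instead of A's linear scan over all stacks for every character.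
import Mathlib
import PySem

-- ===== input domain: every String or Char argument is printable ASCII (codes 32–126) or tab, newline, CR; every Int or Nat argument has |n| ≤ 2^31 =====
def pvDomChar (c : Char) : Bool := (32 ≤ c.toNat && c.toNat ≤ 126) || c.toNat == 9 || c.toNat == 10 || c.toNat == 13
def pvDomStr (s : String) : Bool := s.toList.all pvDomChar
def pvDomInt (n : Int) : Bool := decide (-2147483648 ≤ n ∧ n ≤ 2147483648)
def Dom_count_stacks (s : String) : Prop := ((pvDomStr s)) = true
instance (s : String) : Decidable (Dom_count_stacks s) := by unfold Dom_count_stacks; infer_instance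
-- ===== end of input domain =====

-- B replaces A's per-character linear scan over all stks by one sorted list of
-- stack tops queried with binary search (objective: faster).

-- ===== PORT A =====
-- A's inner 'for j in range(len(stks))' loop; mn = float('inf') is modeled as `none`
def pvBestFit (stks : List (List Char)) (char : Char) : Option Int × Int :=
  (PySem.List.pyRange 0 (stks.length : Int) 1).foldl
    (fun acc j =>
      let top := PySem.List.pyGetD (PySem.List.pyGetD stks j []) (-1) 'A'   -- stks[j][-1]
      if char ≤ top then      -- stks[j][-1] >= char
        let distance : Int := (top.toNat : Int) - (char.toNat : Int)          -- ord(..) - ord(..)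
        if (match acc.1 with | none => true | some m => distance < m) then (some distance, j)
        else acc
      else acc)
    (none, -1)

-- one iteration of A's outer loop
def pvStepA (stks : List (List Char)) (char : Char) : List (List Char) :=
  let r := pvBestFit stks char
  if r.2 = -1 then stks ++ [[char]]
  else PySem.List.pySetD stks r.2 (PySem.List.pyGetD stks r.2 [] ++ [char])

def count_stacks (s : String) : Int :=
  match PySem.Str.pyGet? s 0 with
  | none => 0   -- s[0] raises IndexError on the empty string: excluded by Pre_
  | some c0 =>
    (((PySem.List.pyRange 1 (PySem.Str.len s) 1).foldl
        (fun stks i => pvStepA stks (PySem.List.pyGetD s.toList i 'A'))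
        [[c0]]).length : Int)

-- ===== PORT B =====
-- the 'while lo < hi' binary search of Source B; fuel bounds the iteration count
def pvBisect (tops : List Char) (ch : Char) : Nat → Nat → Nat → Nat
  | 0, lo, _hi => lo
  | fuel+1, lo, hi =>
    if lo < hi then
      if tops.getD ((lo + hi) / 2) 'A' < ch then pvBisect tops ch fuel ((lo + hi) / 2 + 1) hi
      else pvBisect tops ch fuel lo ((lo + hi) / 2)
    else lo

-- one iteration of Source B's 'for ch in s' loop
def pvStepB (tops : List Char) (ch : Char) : List Char :=
  let lo := pvBisect tops ch tops.length 0 tops.length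
  if lo = tops.length then tops ++ [ch] else tops.set lo ch

def count_stacks_alt (s : String) : Int := ((s.toList.foldl pvStepB []).length : Int)

-- ===== PRECONDITION & SPEC =====
-- Pre_ excludes only the empty string, on which A raises IndexError when reading the first character.
def Pre_count_stacks (s : String) : Prop := s ≠ ""
instance (s : String) : Decidable (Pre_count_stacks s) := by unfold Pre_count_stacks; infer_instance
def pvWitness_count_stacks : String := "cab"

def Spec_count_stacks (s : String) (out : Int) : Prop := out = count_stacks_alt s
instance (s : String) (out : Int) : Decidable (Spec_count_stacks s out) := by unfold Spec_count_stacks; infer_instance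

-- ===== CLAIM (what is proved, stated in full; the proofs are below) =====
def Claim_equal_count_stacks : Prop := ∀ (s : String), Dom_count_stacks s → Pre_count_stacks s → Spec_count_stacks s (count_stacks s)

-- ===== LEMMAS AND PROOFS =====

-- the top of a stack (any default: stacks are always nonempty along the runs we relate)
def pvTop (st : List Char) : Char := st.getLastD 'A'
def pvTops (stks : List (List Char)) : List Char := stks.map pvTop

-- the coupling invariant: B's state is a sorted rearrangement of A's stack tops
def pvInv (stks : List (List Char)) (tops : List Char) : Prop :=
  (∀ st ∈ stks, st ≠ []) ∧ tops.Pairwise (· ≤ ·) ∧ (pvTops stks).Perm tops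

lemma pv_char_lt_iff (a b : Char) : a < b ↔ a.toNat < b.toNat := by
  rw [Char.lt_def, ← Char.toNat_val a, ← Char.toNat_val b, UInt32.lt_iff_toNat_lt]
lemma pv_char_le_iff (a b : Char) : a ≤ b ↔ a.toNat ≤ b.toNat := by
  rw [Char.le_def, ← Char.toNat_val a, ← Char.toNat_val b, UInt32.le_iff_toNat_le]

-- A's inner-loop body, named for the proofs
def pvBody (stks : List (List Char)) (c : Char) (acc : Option Int × Int) (j : Int) : Option Int × Int :=
  let top := PySem.List.pyGetD (PySem.List.pyGetD stks j []) (-1) 'A'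
  if c ≤ top then
    let distance : Int := (top.toNat : Int) - (c.toNat : Int)
    if (match acc.1 with | none => true | some m => distance < m) then (some distance, j)
    else acc
  else acc

lemma pvBestFit_eq (stks : List (List Char)) (c : Char) :
    pvBestFit stks c = (PySem.List.pyRange 0 (stks.length : Int) 1).foldl (pvBody stks c) (none, -1) := rfl

lemma pvBody_skip (stks : List (List Char)) (c : Char) (acc : Option Int × Int) (j : Int)
    (h : ¬ c ≤ PySem.List.pyGetD (PySem.List.pyGetD stks j []) (-1) 'A') :
    pvBody stks c acc j = acc := by simp [pvBody, h]

lemma pvBody_none (stks : List (List Char)) (c : Char) (i : Int) (j : Int)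
    (h : c ≤ PySem.List.pyGetD (PySem.List.pyGetD stks j []) (-1) 'A') :
    pvBody stks c (none, i) j
      = (some (((PySem.List.pyGetD (PySem.List.pyGetD stks j []) (-1) 'A').toNat : Int) - (c.toNat : Int)), j) := by
  simp [pvBody, h]

lemma pvBody_some (stks : List (List Char)) (c : Char) (m : Int) (i : Int) (j : Int)
    (h : c ≤ PySem.List.pyGetD (PySem.List.pyGetD stks j []) (-1) 'A') :
    pvBody stks c (some m, i) j
      = if ((PySem.List.pyGetD (PySem.List.pyGetD stks j []) (-1) 'A').toNat : Int) - (c.toNat : Int) < m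
        then (some (((PySem.List.pyGetD (PySem.List.pyGetD stks j []) (-1) 'A').toNat : Int) - (c.toNat : Int)), j)
        else (some m, i) := by
  by_cases hd : ((PySem.List.pyGetD (PySem.List.pyGetD stks j []) (-1) 'A').toNat : Int) - (c.toNat : Int) < m
  · simp [pvBody, h, hd]
  · simp [pvBody, h, hd]

lemma pvBestFit_aux (stks : List (List Char)) (c : Char) (hne : ∀ st ∈ stks, st ≠ []) :
    ∀ n, n ≤ stks.length →
    ((List.range n).foldl (fun acc (k : Nat) => pvBody stks c acc (k : Int)) (none, -1) = (none, -1)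
       ∧ ∀ k, k < n → (pvTops stks).getD k 'A' < c)
     ∨ (∃ j, j < n
         ∧ (List.range n).foldl (fun acc (k : Nat) => pvBody stks c acc (k : Int)) (none, -1)
             = (some ((((pvTops stks).getD j 'A').toNat : Int) - (c.toNat : Int)), (j : Int))
         ∧ c ≤ (pvTops stks).getD j 'A'
         ∧ ∀ k, k < n → c ≤ (pvTops stks).getD k 'A' → (pvTops stks).getD j 'A' ≤ (pvTops stks).getD k 'A') := by
  intro n
  induction n with
  | zero => intro _; left; exact ⟨rfl, by omega⟩
  | succ n ih =>
    intro hn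
    have hn' : n < stks.length := by omega
    have ihr := ih (by omega)
    rw [List.range_succ, List.foldl_append, List.foldl_cons, List.foldl_nil]
    have hsn : PySem.List.pyGetD stks (n : Int) [] = stks[n] := by
      rw [PySem.List.pyGetD_natCast, List.getD_eq_getElem stks [] hn']
    have hnem : stks[n] ≠ [] := hne _ (List.getElem_mem hn')
    have htop : PySem.List.pyGetD (PySem.List.pyGetD stks (n : Int) []) (-1) 'A'
        = (pvTops stks).getD n 'A' := by
      rw [hsn, PySem.List.pyGetD_neg_one _ _ hnem]
      rw [List.getD_eq_getElem (pvTops stks) 'A' (by simpa [pvTops] using hn')]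
      simp [pvTops, pvTop, List.getLastD_eq_getLast?, List.getLast?_eq_some_getLast hnem]
    set T := pvTops stks with hT
    by_cases hc : c ≤ T.getD n 'A'
    · have hc' : c ≤ PySem.List.pyGetD (PySem.List.pyGetD stks (n : Int) []) (-1) 'A' := htop ▸ hc
      rcases ihr with ⟨hr, hall⟩ | ⟨j, hj, hr, hcj, hmin⟩
      · rw [hr, pvBody_none stks c _ _ hc', htop]
        right
        refine ⟨n, by omega, rfl, hc, ?_⟩
        intro k hk hck
        rcases Nat.lt_or_eq_of_le (Nat.le_of_lt_succ hk) with h | h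
        · exact absurd hck (not_le.mpr (hall k h))
        · subst h; exact le_refl _
      · rw [hr, pvBody_some stks c _ _ _ hc', htop]
        by_cases hd : ((T.getD n 'A').toNat : Int) - (c.toNat : Int)
            < ((T.getD j 'A').toNat : Int) - (c.toNat : Int)
        · rw [if_pos hd]
          right
          refine ⟨n, by omega, rfl, hc, ?_⟩
          intro k hk hck
          have hnj : T.getD n 'A' < T.getD j 'A' := by rw [pv_char_lt_iff]; omega
          rcases Nat.lt_or_eq_of_le (Nat.le_of_lt_succ hk) with h | h
          · exact le_of_lt (lt_of_lt_of_le hnj (hmin k h hck))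
          · subst h; exact le_refl _
        · rw [if_neg hd]
          right
          refine ⟨j, by omega, rfl, hcj, ?_⟩
          intro k hk hck
          rcases Nat.lt_or_eq_of_le (Nat.le_of_lt_succ hk) with h | h
          · exact hmin k h hck
          · subst h; rw [pv_char_le_iff]; omega
    · have hc' : ¬ c ≤ PySem.List.pyGetD (PySem.List.pyGetD stks (n : Int) []) (-1) 'A' := htop ▸ hc
      rw [pvBody_skip stks c _ _ hc']
      rcases ihr with ⟨hr, hall⟩ | ⟨j, hj, hr, hcj, hmin⟩
      · left
        refine ⟨hr, ?_⟩
        intro k hk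
        rcases Nat.lt_or_eq_of_le (Nat.le_of_lt_succ hk) with h | h
        · exact hall k h
        · subst h; exact not_le.mp hc
      · right
        refine ⟨j, by omega, hr, hcj, ?_⟩
        intro k hk hck
        rcases Nat.lt_or_eq_of_le (Nat.le_of_lt_succ hk) with h | h
        · exact hmin k h hck
        · subst h; exact absurd hck hc

lemma pv_getD_mem (l : List Char) (k : Nat) (hk : k < l.length) : l.getD k 'A' ∈ l := by
  rw [List.getD_eq_getElem l 'A' hk]; exact List.getElem_mem hk

lemma pvBestFit_spec (stks : List (List Char)) (c : Char) (hne : ∀ st ∈ stks, st ≠ []) :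
    ((pvBestFit stks c).2 = -1 ∧ ∀ t ∈ pvTops stks, t < c)
    ∨ (∃ j : Nat, j < (pvTops stks).length ∧ (pvBestFit stks c).2 = (j : Int)
        ∧ c ≤ (pvTops stks).getD j 'A'
        ∧ ∀ t ∈ pvTops stks, c ≤ t → (pvTops stks).getD j 'A' ≤ t) := by
  have hfold : pvBestFit stks c
      = (List.range stks.length).foldl (fun acc (k : Nat) => pvBody stks c acc (k : Int)) (none, -1) := by
    rw [pvBestFit_eq, PySem.List.pyRange_zero_nat, List.foldl_map]
  have hlen : (pvTops stks).length = stks.length := by simp [pvTops]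
  rcases pvBestFit_aux stks c hne stks.length (le_refl _) with ⟨hr, hall⟩ | ⟨j, hj, hr, hcj, hmin⟩
  · left
    refine ⟨by rw [hfold, hr], ?_⟩
    intro t ht
    rcases List.mem_iff_getElem.mp ht with ⟨k, hk, hkt⟩
    have := hall k (by omega)
    rwa [List.getD_eq_getElem _ 'A' hk, hkt] at this
  · right
    refine ⟨j, by omega, by rw [hfold, hr], hcj, ?_⟩
    intro t ht hct
    rcases List.mem_iff_getElem.mp ht with ⟨k, hk, hkt⟩
    have := hmin k (by omega) (by rwa [List.getD_eq_getElem _ 'A' hk, hkt])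
    rwa [List.getD_eq_getElem _ 'A' hk, hkt] at this


lemma pv_sorted_getD_mono {l : List Char} (hs : l.Pairwise (· ≤ ·)) {i j : Nat}
    (hij : i ≤ j) (hj : j < l.length) : l.getD i 'A' ≤ l.getD j 'A' := by
  have hi : i < l.length := lt_of_le_of_lt hij hj
  rw [List.getD_eq_getElem l 'A' hi, List.getD_eq_getElem l 'A' hj]
  rcases Nat.lt_or_eq_of_le hij with h | h
  · exact List.pairwise_iff_getElem.mp hs i j hi hj h
  · subst h; exact le_refl _

lemma pv_set_perm_cons_eraseIdx {α : Type} (l : List α) (i : Nat) (a : α) (h : i < l.length) :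
    (l.set i a).Perm (a :: l.eraseIdx i) := by
  induction l generalizing i with
  | nil => simp at h
  | cons x t ih =>
    cases i with
    | zero => simp
    | succ n =>
      simp only [List.set_cons_succ, List.eraseIdx_cons_succ]
      exact ((ih n (by simpa using h)).cons x).trans (List.Perm.swap a x _)

lemma pv_sorted_set (tops : List Char) (i : Nat) (c : Char) (hs : tops.Pairwise (· ≤ ·))
    (hi : i < tops.length) (hlow : ∀ k, k < i → tops.getD k 'A' < c)
    (hci : c ≤ tops.getD i 'A') : (tops.set i c).Pairwise (· ≤ ·) := by
  rw [List.pairwise_iff_getElem]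
  intro p q hp hq hpq
  simp only [List.length_set] at hp hq
  have hgi : tops.getD i 'A' = tops[i] := List.getD_eq_getElem tops 'A' hi
  rw [List.getElem_set, List.getElem_set]
  split_ifs with h1 h2 h2
  · omega
  · -- p = i < q : c ≤ tops[q]
    have : tops[i] ≤ tops[q] := by
      rcases Nat.lt_or_eq_of_le (le_of_lt (h1 ▸ hpq)) with h | h
      · exact List.pairwise_iff_getElem.mp hs i q hi hq (h1 ▸ hpq)
      · omega
    exact le_trans (hgi ▸ hci) this
  · -- q = i, p < i : tops[p] < c
    have := hlow p (h2 ▸ hpq)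
    rw [List.getD_eq_getElem tops 'A' hp] at this
    exact le_of_lt this
  · exact List.pairwise_iff_getElem.mp hs p q hp hq hpq

lemma pvBisect_spec (tops : List Char) (c : Char) (hs : tops.Pairwise (· ≤ ·)) :
    ∀ fuel lo hi, lo ≤ hi → hi ≤ tops.length → hi - lo ≤ fuel →
    (∀ k, k < lo → tops.getD k 'A' < c) →
    (∀ k, hi ≤ k → k < tops.length → c ≤ tops.getD k 'A') →
    (pvBisect tops c fuel lo hi ≤ tops.length ∧
     (∀ k, k < pvBisect tops c fuel lo hi → tops.getD k 'A' < c) ∧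
     (∀ k, pvBisect tops c fuel lo hi ≤ k → k < tops.length → c ≤ tops.getD k 'A')) := by
  intro fuel
  induction fuel with
  | zero =>
    intro lo hi h1 h2 h3 hl hu
    have : lo = hi := by omega
    subst this
    exact ⟨h2, by simpa [pvBisect] using hl, by simpa [pvBisect] using hu⟩
  | succ fuel ih =>
    intro lo hi h1 h2 h3 hl hu
    by_cases hlt : lo < hi
    · have hmid : (lo + hi) / 2 < hi := by omega
      have hmlo : lo ≤ (lo + hi) / 2 := by omega
      have hmlen : (lo + hi) / 2 < tops.length := by omega
      rw [pvBisect, if_pos hlt]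
      by_cases hc : tops.getD ((lo + hi) / 2) 'A' < c
      · rw [if_pos hc]
        exact ih ((lo + hi) / 2 + 1) hi (by omega) h2 (by omega)
          (fun k hk => lt_of_le_of_lt (pv_sorted_getD_mono hs (by omega) hmlen) hc |>.trans_le (le_refl _) |> (fun _ => lt_of_le_of_lt (pv_sorted_getD_mono hs (by omega : k ≤ (lo+hi)/2) hmlen) hc)) hu
      · rw [if_neg hc]
        push Not at hc
        exact ih lo ((lo + hi) / 2) (by omega) (by omega) (by omega) hl
          (fun k hk hklen => le_trans hc (pv_sorted_getD_mono hs hk hklen))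
    · rw [pvBisect, if_neg hlt]
      have : lo = hi := by omega
      subst this
      exact ⟨h2, hl, hu⟩

lemma pv_eraseIdx_perm_erase (l : List Char) (i : Nat) (m : Char) (h : i < l.length)
    (hm : l[i] = m) : (l.eraseIdx i).Perm (l.erase m) := by
  have h1 : (m :: l.eraseIdx i).Perm l := by rw [← hm]; exact List.getElem_cons_eraseIdx_perm h
  have hmem : m ∈ l := hm ▸ List.getElem_mem h
  have h2 : (m :: l.erase m).Perm l := (List.perm_cons_erase hmem).symm
  exact (List.perm_cons m).mp (h1.trans h2.symm)


lemma pvStep_equiv (stks : List (List Char)) (tops : List Char) (c : Char)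
    (h : pvInv stks tops) : pvInv (pvStepA stks c) (pvStepB tops c) := by
  obtain ⟨hne, hsort, hperm⟩ := h
  have hlenT : (pvTops stks).length = stks.length := by simp [pvTops]
  have hlen : (pvTops stks).length = tops.length := hperm.length_eq
  obtain ⟨hile, hlow, hhigh⟩ :=
    pvBisect_spec tops c hsort tops.length 0 tops.length (by omega) (le_refl _) (by omega)
      (by omega) (by omega)
  rcases pvBestFit_spec stks c hne with ⟨h2, hall⟩ | ⟨j, hj, h2, hcj, hmin⟩
  · -- no stack top can accept c: both sides open a new stack
    have hallB : ∀ t ∈ tops, t < c := fun t ht => hall t (hperm.mem_iff.mpr ht)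
    have hi : pvBisect tops c tops.length 0 tops.length = tops.length := by
      by_contra hne2
      have hilt : pvBisect tops c tops.length 0 tops.length < tops.length := by omega
      exact absurd (hhigh _ (le_refl _) hilt) (not_le.mpr (hallB _ (pv_getD_mem tops _ hilt)))
    have hA : pvStepA stks c = stks ++ [[c]] := by simp [pvStepA, h2]
    have hB : pvStepB tops c = tops ++ [c] := by simp only [pvStepB]; rw [if_pos hi]
    rw [hA, hB]
    refine ⟨?_, ?_, ?_⟩
    · intro st hst
      rcases List.mem_append.mp hst with h3 | h3
      · exact hne st h3
      · simp at h3; subst h3; simp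
    · rw [List.pairwise_append]
      exact ⟨hsort, List.pairwise_singleton _ _,
        fun x hx y hy => by simp at hy; subst hy; exact le_of_lt (hallB x hx)⟩
    · have : pvTops (stks ++ [[c]]) = pvTops stks ++ [c] := by simp [pvTops, pvTop]
      rw [this]
      exact hperm.append (List.Perm.refl [c])
  · -- best fit exists: A pushes onto stack j, B overwrites position i; same top replaced
    set i := pvBisect tops c tops.length 0 tops.length with hidef
    have hjs : j < stks.length := hlenT ▸ hj
    have hilt : i < tops.length := by
      by_contra h3
      have hieq : ∀ k, k < tops.length → tops.getD k 'A' < c := fun k hk => hlow k (by omega)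
      have hmem : (pvTops stks).getD j 'A' ∈ tops := hperm.mem_iff.mp (pv_getD_mem _ j hj)
      rcases List.mem_iff_getElem.mp hmem with ⟨k, hk, hkA⟩
      have := hieq k hk
      rw [List.getD_eq_getElem _ 'A' hk, hkA] at this
      exact absurd hcj (not_le.mpr this)
    have hcmB : c ≤ tops.getD i 'A' := hhigh i (le_refl _) hilt
    have h1 : (pvTops stks).getD j 'A' ≤ tops.getD i 'A' :=
      hmin _ (hperm.mem_iff.mpr (pv_getD_mem tops i hilt)) hcmB
    have hmAmem : (pvTops stks).getD j 'A' ∈ tops := hperm.mem_iff.mp (pv_getD_mem _ j hj)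
    obtain ⟨k, hk, hkA⟩ := List.mem_iff_getElem.mp hmAmem
    have hki : i ≤ k := by
      by_contra h3
      have := hlow k (by omega)
      rw [List.getD_eq_getElem _ 'A' hk, hkA] at this
      exact absurd hcj (not_le.mpr this)
    have h2' : tops.getD i 'A' ≤ (pvTops stks).getD j 'A' := by
      have := pv_sorted_getD_mono hsort hki hk
      rwa [List.getD_eq_getElem _ 'A' hk, hkA] at this
    have hmm : (pvTops stks).getD j 'A' = tops.getD i 'A' := le_antisymm h1 h2'
    have hA : pvStepA stks c = stks.set j ((stks.getD j []) ++ [c]) := by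
      have hj' : ((j : Int) = -1) = False := by simp
      simp only [pvStepA, h2, hj', if_false]
      rw [PySem.List.pySetD_natCast, PySem.List.pyGetD_natCast]
    have hB : pvStepB tops c = tops.set i c := by
      simp only [pvStepB, ← hidef]
      rw [if_neg (by omega)]
    rw [hA, hB]
    refine ⟨?_, ?_, ?_⟩
    · intro st hst
      rcases List.mem_or_eq_of_mem_set hst with h3 | h3
      · exact hne st h3
      · subst h3; simp
    · exact pv_sorted_set tops i c hsort hilt hlow hcmB
    · have hT' : pvTops (stks.set j ((stks.getD j []) ++ [c])) = (pvTops stks).set j c := by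
        simp [pvTops, List.map_set, pvTop]
      rw [hT']
      have pa := pv_set_perm_cons_eraseIdx (pvTops stks) j c hj
      have pb := pv_set_perm_cons_eraseIdx tops i c hilt
      have pe : ((pvTops stks).eraseIdx j).Perm (tops.eraseIdx i) := by
        have e1 := pv_eraseIdx_perm_erase (pvTops stks) j ((pvTops stks).getD j 'A') hj
          (List.getD_eq_getElem _ 'A' hj).symm
        have e2 := pv_eraseIdx_perm_erase tops i (tops.getD i 'A') hilt
          (List.getD_eq_getElem _ 'A' hilt).symm
        rw [← hmm] at e2
        exact e1.trans ((hperm.erase _).trans e2.symm)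
      exact pa.trans ((pe.cons c).trans pb.symm)

lemma pvFold_inv (rest : List Char) : ∀ stks tops, pvInv stks tops →
    pvInv (rest.foldl pvStepA stks) (rest.foldl pvStepB tops) := by
  intro stks tops h
  induction rest generalizing stks tops with
  | nil => exact h
  | cons c r ih => exact ih _ _ (pvStep_equiv _ _ c h)

-- ===== VERDICT (by name: the statement is the Claim_ definition above) =====
theorem count_stacks_spec : Claim_equal_count_stacks := by
  intro s _ hpre
  unfold Spec_count_stacks
  obtain ⟨c0, rest, hcs⟩ : ∃ c0 rest, s.toList = c0 :: rest := by
    cases hc : s.toList with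
    | nil =>
      exact absurd (by apply String.ext; simpa using hc) hpre
    | cons a t => exact ⟨a, t, rfl⟩
  have hg : PySem.Str.pyGet? s 0 = some c0 := by
    simp [PySem.Str.pyGet?, hcs, pysem]
  have hA : count_stacks s = ((rest.foldl pvStepA [[c0]]).length : Int) := by
    unfold count_stacks
    simp only [hg]
    rw [PySem.Str.len_eq, hcs]
    rw [PySem.List.foldl_pyRange_pyGetD' (c0 :: rest) 'A' pvStepA [[c0]] (by omega : (0:Int) ≤ 1)]
    simp
  have hB : count_stacks_alt s = ((rest.foldl pvStepB [c0]).length : Int) := by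
    unfold count_stacks_alt
    rw [hcs, List.foldl_cons]
    have h0 : pvStepB [] c0 = [c0] := by simp [pvStepB, pvBisect]
    rw [h0]
  have hinv0 : pvInv [[c0]] [c0] := ⟨by simp, List.pairwise_singleton _ _, by simp [pvTops, pvTop]⟩
  obtain ⟨_, _, hp⟩ := pvFold_inv rest [[c0]] [c0] hinv0
  have hlen : (rest.foldl pvStepA [[c0]]).length = (rest.foldl pvStepB [c0]).length := by
    have h1 := hp.length_eq
    simpa [pvTops] using h1
  rw [hA, hB, hlen]
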